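-- pv_equiv track=rewrite | github.com/Savoie-Research-Group/yarp | reaction/model_reaction.py | return_bnfm
-- ===== SOURCE A (Python) =====
-- def return_bnfm(bondmat):
--     break_bond=[]
--     form_bond=[]
--     reactive_atoms=[]
--     for i in range(len(bondmat)):
--         for j in range(len(bondmat)):
--             if i>j:
--                 if bondmat[i][j]>0:
--                     form_bond+=[(i, j)]
--                     if i not in reactive_atoms: reactive_atoms.append(i)
--                     if j not in reactive_atoms: reactive_atoms.append(j)
--                 elif bondmat[i][j]<0:
--                     break_bond+=[(i, j)]
--                     if i not in reactive_atoms: reactive_atoms.append(i)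
--                     if j not in reactive_atoms: reactive_atoms.append(j)
--     return break_bond, form_bond, reactive_atoms
-- ===== SOURCE B (Python) =====
-- def return_bnfm(bondmat):
--     # Row-recursive decomposition: each row contributes the bonds of its
--     # sub-diagonal slice; reactive atoms are recovered afterwards by sorting the
--     # combined bond lists (lex order = the original scan order) and deduping.
--     def go(idx, rows):
--         if not rows:
--             return [], []
--         head = rows[0][:idx]
--         bb, fb = go(idx + 1, rows[1:])
--         return ([(idx, j) for j, v in enumerate(head) if v < 0] + bb,
--                 [(idx, j) for j, v in enumerate(head) if v > 0] + fb)
--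
--     break_bond, form_bond = go(0, bondmat)
--     merged = sorted(break_bond + form_bond)
--
--     reactive_atoms = []
--     seen = set()
--     for i, j in merged:
--         for a in (i, j):
--             if a not in seen:
--                 seen.add(a)
--                 reactive_atoms.append(a)
--     return break_bond, form_bond, reactive_atoms
-- ===== Notes on version B (the rewrite author's own statement) =====
-- stated objective: alternative
-- what changed: Replaces A's index-driven double loop (with membership tests into the growing result list) by a row-recursive decomposition over sub-diagonal slices producing the two bond lists, from which the reactive atoms are reconstructed afterwards by sorting the combined bond lists (lex order = scan order) and deduping with a seen-set.
import Mathlib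
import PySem

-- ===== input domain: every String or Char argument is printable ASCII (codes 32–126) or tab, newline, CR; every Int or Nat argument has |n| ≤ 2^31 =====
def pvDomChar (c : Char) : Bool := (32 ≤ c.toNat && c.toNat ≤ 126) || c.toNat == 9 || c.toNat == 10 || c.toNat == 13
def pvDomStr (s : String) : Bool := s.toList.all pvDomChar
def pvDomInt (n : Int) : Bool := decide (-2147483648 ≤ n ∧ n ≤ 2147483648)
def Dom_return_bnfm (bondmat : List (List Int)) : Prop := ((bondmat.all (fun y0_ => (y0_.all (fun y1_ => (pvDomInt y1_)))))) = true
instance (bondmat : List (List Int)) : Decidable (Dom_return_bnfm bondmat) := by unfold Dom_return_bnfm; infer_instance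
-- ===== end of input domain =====

-- B replaces A's index-driven double loop (with membership tests into the growing result)
-- by a row-recursive pass over sub-diagonal slices plus a sort of the combined bond lists
-- to recover the scan order for the dedup (objective: alternative).

-- ===== PORT A =====
def return_bnfm (bondmat : List (List Int)) : (List (Int × Int)) × (List (Int × Int)) × List Int :=
  (PySem.List.pyRange 0 bondmat.length 1).foldl (fun s i =>
    (PySem.List.pyRange 0 bondmat.length 1).foldl (fun s j =>
      if i > j then
        let v := PySem.List.pyGetD (PySem.List.pyGetD bondmat i []) j 0
        if v > 0 then
          (s.1, s.2.1 ++ [(i, j)],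
            let ra := if i ∈ s.2.2 then s.2.2 else s.2.2 ++ [i]
            if j ∈ ra then ra else ra ++ [j])
        else if v < 0 then
          (s.1 ++ [(i, j)], s.2.1,
            let ra := if i ∈ s.2.2 then s.2.2 else s.2.2 ++ [i]
            if j ∈ ra then ra else ra ++ [j])
        else s
      else s) s) ([], [], [])

-- ===== PORT B =====
-- go(idx, rows): per-row slice rows[0][:idx], recursion on the rest
def pvGo (idx : Int) (rows : List (List Int)) : List (Int × Int) × List (Int × Int) :=
  match rows with
  | [] => ([], [])
  | r :: rest =>
      let head := PySem.List.slice r none (some idx)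
      let bf := pvGo (idx + 1) rest
      ((PySem.List.enumerate head 0).filterMap
          (fun q => if q.2 < 0 then some (idx, q.1) else none) ++ bf.1,
       (PySem.List.enumerate head 0).filterMap
          (fun q => if q.2 > 0 then some (idx, q.1) else none) ++ bf.2)

def return_bnfm_alt (bondmat : List (List Int)) : (List (Int × Int)) × (List (Int × Int)) × List Int :=
  let bf := pvGo 0 bondmat
  -- sorted(break_bond + form_bond): Python compares int pairs lexicographically,
  -- which is exactly the toLex order on Int × Int
  let merged := PySem.List.sorted (bf.1 ++ bf.2) (fun p => toLex p)
  -- seen-set dedup of the atoms of merged, in order (PySem.Set.add = seen/append pair)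
  let reactive := merged.foldl (fun acc p => PySem.Set.add (PySem.Set.add acc p.1) p.2) []
  (bf.1, bf.2, reactive)

-- ===== PRECONDITION & SPEC =====
-- Pre_ excludes ragged matrices on which Python A raises IndexError (row i must have ≥ i entries).
def Pre_return_bnfm (bondmat : List (List Int)) : Prop :=
  ∀ p ∈ bondmat.zipIdx, p.2 ≤ p.1.length
instance (bondmat : List (List Int)) : Decidable (Pre_return_bnfm bondmat) := by unfold Pre_return_bnfm; infer_instance
def pvWitness_return_bnfm : List (List Int) := [[0, 0, 0], [-1, 0, 0], [1, 2, 0]]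

def Spec_return_bnfm (bondmat : List (List Int)) (out : (List (Int × Int)) × (List (Int × Int)) × List Int) : Prop := out = return_bnfm_alt bondmat
instance (bondmat : List (List Int)) (out : (List (Int × Int)) × (List (Int × Int)) × List Int) : Decidable (Spec_return_bnfm bondmat out) := by unfold Spec_return_bnfm; infer_instance

-- ===== CLAIM (what is proved, stated in full; the proofs are below) =====
def Claim_equal_return_bnfm : Prop := ∀ (bondmat : List (List Int)), Dom_return_bnfm bondmat → Pre_return_bnfm bondmat → Spec_return_bnfm bondmat (return_bnfm bondmat)

-- ===== LEMMAS AND PROOFS =====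

-- A's loop body on one admitted cell (i, j) with i > j, guard removed.
def pvStep (bondmat : List (List Int))
    (s : (List (Int × Int)) × (List (Int × Int)) × List Int) (c : Int × Int) :
    (List (Int × Int)) × (List (Int × Int)) × List Int :=
  let v := PySem.List.pyGetD (PySem.List.pyGetD bondmat c.1 []) c.2 0
  if v > 0 then
    (s.1, s.2.1 ++ [c],
      let ra := if c.1 ∈ s.2.2 then s.2.2 else s.2.2 ++ [c.1]
      if c.2 ∈ ra then ra else ra ++ [c.2])
  else if v < 0 then
    (s.1 ++ [c], s.2.1,
      let ra := if c.1 ∈ s.2.2 then s.2.2 else s.2.2 ++ [c.1]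
      if c.2 ∈ ra then ra else ra ++ [c.2])
  else s

-- the nonzero lower-triangle events of bondmat, in scan order
def pvEvRow (r : List Int) (i : Int) : List (Int × Int × Int) :=
  (PySem.List.pyRange 0 i 1).filterMap (fun j =>
    let v := PySem.List.pyGetD r j 0
    if v ≠ 0 then some (i, j, v) else none)

def pvE (bondmat : List (List Int)) : List (Int × Int × Int) :=
  (PySem.List.pyRange 0 bondmat.length 1).flatMap
    (fun i => pvEvRow (PySem.List.pyGetD bondmat i []) i)

def pvF (e : Int × Int × Int) : Int × Int := (e.1, e.2.1)

lemma pvFoldl_ext {α β : Type} (l : List β) (f g : α → β → α)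
    (h : ∀ x ∈ l, ∀ a, f a x = g a x) (s : α) : l.foldl f s = l.foldl g s := by
  induction l generalizing s with
  | nil => rfl
  | cons x xs ih =>
      simp only [List.foldl_cons, h x (by simp)]
      exact ih (fun y hy a => h y (by simp [hy]) a) _

lemma pvFoldl_id {α β : Type} (l : List β) (f : α → β → α)
    (h : ∀ x ∈ l, ∀ a, f a x = a) (s : α) : l.foldl f s = s := by
  induction l generalizing s with
  | nil => rfl
  | cons x xs ih =>
      simp only [List.foldl_cons, h x (by simp)]
      exact ih (fun y hy a => h y (by simp [hy]) a) _

lemma pvFlatMap_congr {α β : Type} (l : List α) (f g : α → List β)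
    (h : ∀ x ∈ l, f x = g x) : l.flatMap f = l.flatMap g := by
  induction l with
  | nil => rfl
  | cons x xs ih =>
      simp only [List.flatMap_cons, h x (by simp)]
      rw [ih (fun y hy => h y (by simp [hy]))]

-- inner guarded fold over the full range = unguarded fold over the j < i prefix
lemma pvInner (bondmat : List (List Int)) (i : Int) (n : Int) (hi : 0 ≤ i) (hin : i ≤ n)
    (s : (List (Int × Int)) × (List (Int × Int)) × List Int) :
    (PySem.List.pyRange 0 n 1).foldl (fun s j =>
      if i > j then pvStep bondmat s (i, j) else s) s
      = (PySem.List.pyRange 0 i 1).foldl (fun s j => pvStep bondmat s (i, j)) s := by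
  rw [PySem.List.pyRange_one_append 0 i n hi hin, List.foldl_append]
  rw [pvFoldl_ext (PySem.List.pyRange 0 i 1) _ (fun s j => pvStep bondmat s (i, j))
      (by intro x hx a; rw [PySem.List.mem_pyRange_one] at hx; simp [hx.2])]
  exact pvFoldl_id _ _ (by
    intro x hx a; rw [PySem.List.mem_pyRange_one] at hx
    simp [not_lt.mpr hx.1]) _

-- B's event extractor on a list of cells.
def pvEv (bondmat : List (List Int)) (L : List (Int × Int)) : List (Int × Int × Int) :=
  L.filterMap (fun c =>
    let v := PySem.List.pyGetD (PySem.List.pyGetD bondmat c.1 []) c.2 0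
    if v ≠ 0 then some (c.1, c.2, v) else none)

-- main invariant: folding A's step over any cell list = derive the three outputs from the events
lemma pvMain (bondmat : List (List Int)) (L : List (Int × Int))
    (s : (List (Int × Int)) × (List (Int × Int)) × List Int) :
    L.foldl (pvStep bondmat) s
      = (s.1 ++ ((pvEv bondmat L).filter (fun e => e.2.2 < 0)).map pvF,
         s.2.1 ++ ((pvEv bondmat L).filter (fun e => e.2.2 > 0)).map pvF,
         ((pvEv bondmat L).flatMap (fun e => [e.1, e.2.1])).foldl PySem.Set.add s.2.2) := by
  induction L generalizing s with
  | nil => simp [pvEv]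
  | cons c L ih =>
      obtain ⟨i, j⟩ := c
      simp only [List.foldl_cons]
      rw [ih]
      rcases lt_trichotomy (PySem.List.pyGetD (PySem.List.pyGetD bondmat i []) j 0) 0 with hv | hv | hv
      · simp [pvStep, pvEv, pvF, hv, not_lt.mpr hv.le, hv.ne, PySem.Set.add, PySem.Set.contains]
      · simp [pvStep, pvEv, hv]
      · simp [pvStep, pvEv, pvF, hv, not_lt.mpr hv.le, hv.ne', PySem.Set.add, PySem.Set.contains]

lemma pvEv_flatMap (bondmat : List (List Int)) (l : List Int) (cells : Int → List (Int × Int)) :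
    pvEv bondmat (l.flatMap cells) = l.flatMap (fun i => pvEv bondmat (cells i)) := by
  induction l with
  | nil => rfl
  | cons x xs ih => simp only [List.flatMap_cons, pvEv, List.filterMap_append] at *; rw [ih]

-- A's fold = derive break/form/reactive from the event list pvE (no Pre_ needed)
lemma pvA_char (bm : List (List Int)) :
    return_bnfm bm
      = (((pvE bm).filter (fun e => e.2.2 < 0)).map pvF,
         ((pvE bm).filter (fun e => e.2.2 > 0)).map pvF,
         ((pvE bm).flatMap (fun e => [e.1, e.2.1])).foldl PySem.Set.add []) := by
  unfold return_bnfm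
  rw [pvFoldl_ext (PySem.List.pyRange 0 bm.length 1) _
      (fun s i => ((PySem.List.pyRange 0 i 1).map (fun j => ((i, j) : Int × Int))).foldl (pvStep bm) s)
      (by
        intro i hi s
        rw [PySem.List.mem_pyRange_one] at hi
        beta_reduce
        rw [List.foldl_map]
        exact pvInner bm i bm.length hi.1 (by exact_mod_cast hi.2.le) s)]
  rw [← List.foldl_flatMap]
  rw [pvMain]
  have hev : pvEv bm ((PySem.List.pyRange 0 bm.length 1).flatMap
        (fun i => (PySem.List.pyRange 0 i 1).map (fun j => ((i, j) : Int × Int))))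
      = pvE bm := by
    rw [pvEv_flatMap]
    unfold pvE
    refine pvFlatMap_congr _ _ _ (fun i _ => ?_)
    simp only [pvEv, pvEvRow, List.filterMap_map]
    rfl
  rw [hev]
  simp

-- per-row: B's slice/enumerate comprehension = the sign filter of the row's events
lemma pvRow_char (r : List Int) (i : Int) (hi : 0 ≤ i) (hlen : i.toNat ≤ r.length)
    (P : Int → Bool) (hP0 : P 0 = false) :
    (PySem.List.enumerate (PySem.List.slice r none (some i)) 0).filterMap
        (fun q => if P q.2 then some (i, q.1) else none)
      = ((pvEvRow r i).filter (fun e => P e.2.2 && decide (e.2.2 ≠ 0))).map pvF := by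
  have hslice : PySem.List.slice r none (some i) = r.take i.toNat :=
    PySem.List.slice_to r hi
  have hlen2 : PySem.List.len (r.take i.toNat) = i := by
    simp [PySem.List.len, List.length_take, Nat.min_eq_left hlen, Int.toNat_of_nonneg hi]
  rw [hslice, PySem.List.enumerate_eq_map_pyRange (r.take i.toNat) 0, hlen2, List.filterMap_map]
  unfold pvEvRow
  rw [List.filter_filterMap, List.map_filterMap]
  refine List.filterMap_congr (fun j hj => ?_)
  rw [PySem.List.mem_pyRange_one] at hj
  have hjr : j.toNat < r.length := by omega
  have hgj : PySem.List.pyGetD (r.take i.toNat) j 0 = r[j.toNat]'hjr := by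
    rw [PySem.List.pyGetD_eq_getElem _ _ hj.1 (by simp [List.length_take]; omega)]
    simp [List.getElem_take]
  have hgr : PySem.List.pyGetD r j 0 = r[j.toNat]'hjr :=
    PySem.List.pyGetD_eq_getElem _ _ hj.1 (by omega)
  by_cases hz : r[j.toNat]'hjr = 0
  · simp [Function.comp, hgj, hgr, hz, hP0, Option.filter, pvF]
  · by_cases hp : P (r[j.toNat]'hjr) = true
    · simp [Function.comp, hgj, hgr, hz, hp, Option.filter, pvF]
    · simp [Function.comp, hgj, hgr, hz, hp, Option.filter, pvF]

-- go = flatMap of the per-row comprehensions over the enumerated rows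
lemma pvGo_char (rows : List (List Int)) (idx : Int) :
    pvGo idx rows
      = ((PySem.List.enumerate rows idx).flatMap (fun p =>
            (PySem.List.enumerate (PySem.List.slice p.2 none (some p.1)) 0).filterMap
              (fun q => if q.2 < 0 then some (p.1, q.1) else none)),
         (PySem.List.enumerate rows idx).flatMap (fun p =>
            (PySem.List.enumerate (PySem.List.slice p.2 none (some p.1)) 0).filterMap
              (fun q => if q.2 > 0 then some (p.1, q.1) else none))) := by
  induction rows generalizing idx with
  | nil => simp [pvGo, PySem.List.enumerate_nil]
  | cons r rest ih =>
      simp only [pvGo, PySem.List.enumerate_cons, List.flatMap_cons, ih]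

-- Pre_ gives the row-length bound for every index produced by the range
lemma pvRowLen (bm : List (List Int)) (hpre : Pre_return_bnfm bm) (i : Int)
    (h0 : 0 ≤ i) (hn : i < (bm.length : Int)) :
    i.toNat ≤ (PySem.List.pyGetD bm i []).length := by
  have hlt : i.toNat < bm.length := by omega
  have hg : PySem.List.pyGetD bm i [] = bm[i.toNat] :=
    PySem.List.pyGetD_eq_getElem _ _ h0 hn
  rw [hg]
  have := hpre (bm[i.toNat], i.toNat) (by
    rw [List.mem_zipIdx_iff_getElem?]
    simp [List.getElem?_eq_getElem hlt])
  simpa using this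

-- B's break/form lists = the sign filters of pvE (under Pre_)
lemma pvBF_char (bm : List (List Int)) (hpre : Pre_return_bnfm bm) :
    pvGo 0 bm
      = (((pvE bm).filter (fun e => e.2.2 < 0)).map pvF,
         ((pvE bm).filter (fun e => e.2.2 > 0)).map pvF) := by
  rw [pvGo_char]
  have henum := PySem.List.enumerate_eq_map_pyRange bm ([] : List Int)
  have key : ∀ (P : Int → Bool) (hP0 : P 0 = false),
      (PySem.List.enumerate bm 0).flatMap (fun p =>
        (PySem.List.enumerate (PySem.List.slice p.2 none (some p.1)) 0).filterMap
          (fun q => if P q.2 then some (p.1, q.1) else none))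
      = ((pvE bm).filter (fun e => P e.2.2)).map pvF := by
    intro P hP0
    rw [henum, List.flatMap_map]
    unfold pvE
    rw [List.filter_flatMap, List.map_flatMap]
    refine pvFlatMap_congr _ _ _ (fun i hi => ?_)
    rw [PySem.List.mem_pyRange_one] at hi
    have := pvRow_char (PySem.List.pyGetD bm i []) i hi.1
      (pvRowLen bm hpre i hi.1 (by exact_mod_cast hi.2)) P hP0
    rw [this]
    congr 1
    refine List.filter_congr (fun e he => ?_)
    unfold pvEvRow at he
    obtain ⟨j, hj, hje⟩ := List.mem_filterMap.mp he
    by_cases hz : PySem.List.pyGetD (PySem.List.pyGetD bm i []) j 0 = 0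
    · simp [hz] at hje
    · simp only [hz, if_neg, ne_eq, not_false_iff, if_true, Option.some.injEq] at hje
      subst hje
      simp [hz]
  have h1 := key (fun v => decide (v < 0)) (by decide)
  have h2 := key (fun v => decide (v > 0)) (by decide)
  simp only [decide_eq_true_eq] at h1 h2
  rw [Prod.mk.injEq]
  exact ⟨h1, h2⟩

-- the two sign filters together are a permutation of the whole event projection
lemma pvPerm (E : List (Int × Int × Int)) (h0 : ∀ e ∈ E, e.2.2 ≠ 0) :
    (((E.filter (fun e => e.2.2 < 0)).map pvF) ++ ((E.filter (fun e => e.2.2 > 0)).map pvF)).Perm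
      (E.map pvF) := by
  rw [← List.map_append]
  refine List.Perm.map pvF ?_
  have hcongr : E.filter (fun e => e.2.2 > 0) = E.filter (fun e => !decide (e.2.2 < 0)) := by
    refine List.filter_congr (fun e he => ?_)
    have hne := h0 e he
    have hiff : (e.2.2 > 0) ↔ ¬ (e.2.2 < 0) := by omega
    rw [decide_eq_decide.mpr hiff, decide_not]
  rw [hcongr]
  exact List.filter_append_perm _ E

-- the event list is strictly lex-sorted (on its (i, j) projection)
lemma pvE_sorted (bm : List (List Int)) :
    ((pvE bm).map pvF).Pairwise (fun a b => toLex a < toLex b) := by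
  rw [List.pairwise_map]
  unfold pvE
  rw [List.pairwise_flatMap]
  constructor
  · intro i _
    unfold pvEvRow
    rw [List.pairwise_filterMap]
    refine List.Pairwise.imp ?_ (PySem.List.pairwise_lt_pyRange_one 0 i)
    intro j1 j2 hlt x hx y hy
    by_cases h1 : PySem.List.pyGetD (PySem.List.pyGetD bm i []) j1 0 = 0
    · simp [h1] at hx
    · simp only [h1, if_neg, ne_eq, not_false_iff, if_true, Option.some.injEq] at hx
      by_cases h2 : PySem.List.pyGetD (PySem.List.pyGetD bm i []) j2 0 = 0
      · simp [h2] at hy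
      · simp only [h2, if_neg, ne_eq, not_false_iff, if_true, Option.some.injEq] at hy
        subst hx; subst hy
        simp [pvF, Prod.Lex.toLex_lt_toLex, hlt]
  · refine List.Pairwise.imp ?_ (PySem.List.pairwise_lt_pyRange_one 0 bm.length)
    intro i1 i2 hlt
    intro x hx y hy
    unfold pvEvRow at hx hy
    obtain ⟨j1, _, hj1⟩ := List.mem_filterMap.mp hx
    obtain ⟨j2, _, hj2⟩ := List.mem_filterMap.mp hy
    by_cases h1 : PySem.List.pyGetD (PySem.List.pyGetD bm i1 []) j1 0 = 0
    · simp [h1] at hj1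
    · simp only [h1, if_neg, ne_eq, not_false_iff, if_true, Option.some.injEq] at hj1
      by_cases h2 : PySem.List.pyGetD (PySem.List.pyGetD bm i2 []) j2 0 = 0
      · simp [h2] at hj2
      · simp only [h2, if_neg, ne_eq, not_false_iff, if_true, Option.some.injEq] at hj2
        subst hj1; subst hj2
        simp [pvF, Prod.Lex.toLex_lt_toLex, hlt]

lemma pvE_nonzero (bm : List (List Int)) : ∀ e ∈ pvE bm, e.2.2 ≠ 0 := by
  intro e he
  unfold pvE at he
  obtain ⟨i, _, hi⟩ := List.mem_flatMap.mp he
  unfold pvEvRow at hi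
  obtain ⟨j, _, hj⟩ := List.mem_filterMap.mp hi
  by_cases hz : PySem.List.pyGetD (PySem.List.pyGetD bm i []) j 0 = 0
  · simp [hz] at hj
  · simp only [hz, if_neg, ne_eq, not_false_iff, if_true, Option.some.injEq] at hj
    subst hj
    exact hz

-- sorting the concatenated bond lists recovers the scan-ordered event projection
lemma pvSorted (bm : List (List Int)) :
    PySem.List.sorted
        ((((pvE bm).filter (fun e => e.2.2 < 0)).map pvF) ++
         (((pvE bm).filter (fun e => e.2.2 > 0)).map pvF)) (fun p => toLex p)
      = (pvE bm).map pvF := by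
  refine PySem.List.sorted_eq_of_perm_of_pairwise_lt _ _ _ (pvPerm (pvE bm) (pvE_nonzero bm)).symm ?_
  exact pvE_sorted bm

-- the atom fold over pairs = the atom fold over the flattened event endpoints
lemma pvReactive (E : List (Int × Int × Int)) (s : List Int) :
    (E.map pvF).foldl (fun acc p => PySem.Set.add (PySem.Set.add acc p.1) p.2) s
      = (E.flatMap (fun e => [e.1, e.2.1])).foldl PySem.Set.add s := by
  rw [List.foldl_map, List.foldl_flatMap]
  rfl

-- ===== VERDICT (by name: the statements are the Claim_ definitions above) =====
theorem return_bnfm_spec : Claim_equal_return_bnfm := by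
  unfold Claim_equal_return_bnfm
  intro bm _ hpre
  show return_bnfm bm = return_bnfm_alt bm
  have hbf := pvBF_char bm hpre
  rw [pvA_char]
  simp only [return_bnfm_alt, hbf]
  rw [pvSorted, pvReactive]
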